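-- pv_equiv track=rewrite | github.com/0rl4nd0l/greyhound-racing-collector | scripts/find_used_icons.py | generate_import_statements
-- ===== SOURCE A (Python) =====
-- def map_icon_to_import(icon_name):
--     """Map icon name to FontAwesome import name."""
--     # Convert kebab-case to camelCase with 'fa' prefix
--     words = icon_name.split("-")
--     camel_case = "fa" + "".join(word.capitalize() for word in words)
--     return camel_case
--
-- def generate_import_statements(icons):
--     """Generate import statements for the found icons."""
--     if not icons:
--         return ""
--
--     # Group icons by likely package
--     solid_icons = []
--     regular_icons = []
--     brand_icons = []
--
--     # Common brand icons (this is a simplified list)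
--     brand_list = {
--         "facebook",
--         "twitter",
--         "instagram",
--         "linkedin",
--         "github",
--         "google",
--         "apple",
--         "microsoft",
--         "amazon",
--         "youtube",
--         "whatsapp",
--         "telegram",
--     }
--
--     # Common regular icons (this is a simplified list)
--     regular_list = {
--         "heart",
--         "star",
--         "bookmark",
--         "calendar",
--         "clock",
--         "envelope",
--         "file",
--         "folder",
--         "image",
--         "user",
--         "thumbs-up",
--         "thumbs-down",
--     }
--
--     for icon in sorted(icons):
--         import_name = map_icon_to_import(icon)
--
--         if any(brand in icon for brand in brand_list):
--             brand_icons.append(import_name)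
--         elif any(reg in icon for reg in regular_list):
--             regular_icons.append(import_name)
--         else:
--             solid_icons.append(import_name)
--
--     imports = []
--
--     if solid_icons:
--         imports.append(
--             f"import {{ {', '.join(solid_icons)} }} from '@fortawesome/free-solid-svg-icons';"
--         )
--
--     if regular_icons:
--         imports.append(
--             f"import {{ {', '.join(regular_icons)} }} from '@fortawesome/free-regular-svg-icons';"
--         )
--
--     if brand_icons:
--         imports.append(
--             f"import {{ {', '.join(brand_icons)} }} from '@fortawesome/free-brands-svg-icons';"
--         )
--
--     return "\n".join(imports)
-- ===== SOURCE B (Python) =====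
-- BRAND_LIST = [
--     "facebook", "twitter", "instagram", "linkedin", "github", "google",
--     "apple", "microsoft", "amazon", "youtube", "whatsapp", "telegram",
-- ]
--
-- REGULAR_LIST = [
--     "heart", "star", "bookmark", "calendar", "clock", "envelope",
--     "file", "folder", "image", "user", "thumbs-up", "thumbs-down",
-- ]
--
-- PACKAGES = ["free-solid-svg-icons", "free-regular-svg-icons", "free-brands-svg-icons"]
--
--
-- def map_icon_to_import(icon_name):
--     """Map icon name to FontAwesome import name (kebab-case -> faCamelCase)."""
--     return "fa" + "".join(w.capitalize() for w in icon_name.split("-"))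
--
--
-- def _rank(icon):
--     """Output-order rank of the package an icon belongs to: solid 0, regular 1, brand 2."""
--     if any(b in icon for b in BRAND_LIST):
--         return 2
--     if any(r in icon for r in REGULAR_LIST):
--         return 1
--     return 0
--
--
-- def _line(rank, names):
--     return "import { %s } from '@fortawesome/%s';" % (", ".join(names), PACKAGES[rank])
--
--
-- def generate_import_statements(icons):
--     """Generate import statements for the found icons."""
--     # One composite-key sort puts the icons in final output order (package rank,
--     # then name); a single linear scan then emits one import line per group.
--     ordered = sorted(icons, key=lambda icon: (_rank(icon), icon))
--     lines = []
--     cur_rank, cur_names = -1, []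
--     for icon in ordered:
--         r = _rank(icon)
--         if r != cur_rank:
--             if cur_names:
--                 lines.append(_line(cur_rank, cur_names))
--             cur_rank, cur_names = r, []
--         cur_names.append(map_icon_to_import(icon))
--     if cur_names:
--         lines.append(_line(cur_rank, cur_names))
--     return "\n".join(lines)
-- ===== Notes on version B (the rewrite author's own statement) =====
-- stated objective: alternative
-- what changed: Replaces A's three named category lists filled by an if/elif chain plus three conditional emit blocks with a single sort by the composite key (package rank, icon name) followed by one linear group scan that flushes an import line at each rank change.
import Mathlib
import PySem

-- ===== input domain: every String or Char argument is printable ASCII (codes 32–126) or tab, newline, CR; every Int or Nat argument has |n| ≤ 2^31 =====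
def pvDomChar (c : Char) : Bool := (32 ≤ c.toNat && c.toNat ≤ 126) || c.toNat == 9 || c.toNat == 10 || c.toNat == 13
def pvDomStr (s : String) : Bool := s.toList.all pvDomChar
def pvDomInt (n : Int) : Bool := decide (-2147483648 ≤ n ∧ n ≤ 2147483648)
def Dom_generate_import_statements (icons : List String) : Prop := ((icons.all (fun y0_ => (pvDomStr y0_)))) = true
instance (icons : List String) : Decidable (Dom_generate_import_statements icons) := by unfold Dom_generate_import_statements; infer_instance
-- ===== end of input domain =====

-- B replaces A's three named category lists and three conditional emit blocks by ONE composite-key sort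
-- (package rank, icon) followed by a single linear group-scan that emits one line per rank group; same output.

-- ===== PORT A =====
-- helpers shared verbatim by both Python files (map_icon_to_import and the two substring lists)
def pvBrandList : List String :=
  ["facebook", "twitter", "instagram", "linkedin", "github", "google",
   "apple", "microsoft", "amazon", "youtube", "whatsapp", "telegram"]
def pvRegularList : List String :=
  ["heart", "star", "bookmark", "calendar", "clock", "envelope",
   "file", "folder", "image", "user", "thumbs-up", "thumbs-down"]
-- Python iterates the brand/regular SETS only through any(...), a Bool OR, so a list port is exact.
def pvIsBrand (icon : String) : Bool := pvBrandList.any (fun b => PySem.Str.isIn b icon)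
def pvIsRegular (icon : String) : Bool := pvRegularList.any (fun r => PySem.Str.isIn r icon)
-- word.capitalize(): first char titlecased, rest lowercased; on the ASCII domain titlecase = upper (exact there).
def pvCapitalize (s : String) : String :=
  match s.toList with
  | [] => ""
  | c :: rest => String.ofList (PySem.Chars.upper [c] ++ PySem.Chars.lower rest)
-- map_icon_to_import (identical helper in Source A and Source B); split? with the literal "-" is always some.
def pvMapIcon (icon : String) : String :=
  "fa" ++ PySem.Str.join "" (((PySem.Str.split? icon "-").getD []).map pvCapitalize)

-- A's loop body: classify each icon of sorted(icons) into (solid, regular, brand)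
def pvStepA (st : List String × List String × List String) (icon : String) :
    List String × List String × List String :=
  let imp := pvMapIcon icon
  if pvIsBrand icon then (st.1, st.2.1, st.2.2 ++ [imp])
  else if pvIsRegular icon then (st.1, st.2.1 ++ [imp], st.2.2)
  else (st.1 ++ [imp], st.2.1, st.2.2)

def generate_import_statements (icons : List String) : String :=
  if icons = [] then ""
  else
    let res := (PySem.List.sorted icons (fun x => x) false).foldl pvStepA ([], [], [])
    let imports :=
      (if res.1 ≠ [] then
        ["import { " ++ PySem.Str.join ", " res.1 ++ " } from '@fortawesome/free-solid-svg-icons';"] else [])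
      ++ (if res.2.1 ≠ [] then
        ["import { " ++ PySem.Str.join ", " res.2.1 ++ " } from '@fortawesome/free-regular-svg-icons';"] else [])
      ++ (if res.2.2 ≠ [] then
        ["import { " ++ PySem.Str.join ", " res.2.2 ++ " } from '@fortawesome/free-brands-svg-icons';"] else [])
    PySem.Str.join "\n" imports

-- ===== PORT B =====
def pvPackages : List String :=
  ["free-solid-svg-icons", "free-regular-svg-icons", "free-brands-svg-icons"]

-- _rank: output-order rank of the package an icon belongs to (solid 0, regular 1, brand 2)
def pvRank (icon : String) : Int :=
  if pvIsBrand icon then 2 else if pvIsRegular icon then 1 else 0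

-- _line: rank is always 0, 1 or 2 where called, so PACKAGES[rank] never raises; getD "" is unreachable.
def pvLine (r : Int) (names : List String) : String :=
  "import { " ++ PySem.Str.join ", " names ++
    (" } from '@fortawesome/" ++ (PySem.List.pyGet? pvPackages r).getD "" ++ "';")

-- B's loop body: on a rank change flush the current group, then append the import name to it
def pvStepB (st : Int × List String × List String) (icon : String) :
    Int × List String × List String :=
  let r := pvRank icon
  let st' :=
    if r ≠ st.1 then
      (r, ([] : List String), if st.2.1 ≠ [] then st.2.2 ++ [pvLine st.1 st.2.1] else st.2.2)
    else st
  (st'.1, st'.2.1 ++ [pvMapIcon icon], st'.2.2)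

-- sorted(icons, key=lambda icon: (_rank(icon), icon)): Python compares the key tuples
-- lexicographically, which is exactly the Lex order on Int × String.
def generate_import_statements_alt (icons : List String) : String :=
  let ordered := PySem.List.sorted icons (fun icon => toLex (pvRank icon, icon)) false
  let res := ordered.foldl pvStepB (-1, [], [])
  let lines := if res.2.1 ≠ [] then res.2.2 ++ [pvLine res.1 res.2.1] else res.2.2
  PySem.Str.join "\n" lines

-- ===== PRECONDITION & SPEC =====
def Spec_generate_import_statements (icons : List String) (out : String) : Prop := out = generate_import_statements_alt icons
instance (icons : List String) (out : String) : Decidable (Spec_generate_import_statements icons out) := by unfold Spec_generate_import_statements; infer_instance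

-- ===== CLAIM (what is proved, stated in full; the proofs are below) =====
def Claim_equal_generate_import_statements : Prop := ∀ (icons : List String), Dom_generate_import_statements icons → Spec_generate_import_statements icons (generate_import_statements icons)

-- ===== LEMMAS AND PROOFS =====

-- the r-rank group of sorted(icons), in A's (and the final) order
def pvGroup (icons : List String) (r : Int) : List String :=
  (PySem.List.sorted icons (fun x => x) false).filter (fun i => pvRank i == r)

def pvKey (icon : String) : Lex (Int × String) := toLex (pvRank icon, icon)

-- the common shape both outputs are reduced to
def pvExpected (icons : List String) : List String :=
  (if (pvGroup icons 0).map pvMapIcon ≠ [] then [pvLine 0 ((pvGroup icons 0).map pvMapIcon)] else [])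
  ++ (if (pvGroup icons 1).map pvMapIcon ≠ [] then [pvLine 1 ((pvGroup icons 1).map pvMapIcon)] else [])
  ++ (if (pvGroup icons 2).map pvMapIcon ≠ [] then [pvLine 2 ((pvGroup icons 2).map pvMapIcon)] else [])

theorem pvLine0_eq (names : List String) :
    pvLine 0 names = "import { " ++ PySem.Str.join ", " names ++ " } from '@fortawesome/free-solid-svg-icons';" := by
  unfold pvLine
  congr 1

theorem pvLine1_eq (names : List String) :
    pvLine 1 names = "import { " ++ PySem.Str.join ", " names ++ " } from '@fortawesome/free-regular-svg-icons';" := by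
  unfold pvLine
  congr 1

theorem pvLine2_eq (names : List String) :
    pvLine 2 names = "import { " ++ PySem.Str.join ", " names ++ " } from '@fortawesome/free-brands-svg-icons';" := by
  unfold pvLine
  congr 1

theorem pvFoldA (S : List String) : ∀ sol reg br : List String,
    S.foldl pvStepA (sol, reg, br) =
      (sol ++ (S.filter (fun i => pvRank i == 0)).map pvMapIcon,
       reg ++ (S.filter (fun i => pvRank i == 1)).map pvMapIcon,
       br ++ (S.filter (fun i => pvRank i == 2)).map pvMapIcon) := by
  induction S with
  | nil => intro sol reg br; simp
  | cons x xs ih =>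
    intro sol reg br
    by_cases hb : pvIsBrand x
    · simp [List.foldl_cons, pvStepA, hb, ih, pvRank]
    · by_cases hr : pvIsRegular x
      · simp [List.foldl_cons, pvStepA, hb, hr, ih, pvRank]
      · simp [List.foldl_cons, pvStepA, hb, hr, ih, pvRank]

theorem pvFoldB_same (r : Int) (L : List String) (hL : ∀ x ∈ L, pvRank x = r) :
    ∀ names lines : List String,
    L.foldl pvStepB (r, names, lines) = (r, names ++ L.map pvMapIcon, lines) := by
  induction L with
  | nil => intro names lines; simp
  | cons x xs ih =>
    intro names lines
    have hx : pvRank x = r := hL x (by simp)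
    have hxs : ∀ y ∈ xs, pvRank y = r := fun y hy => hL y (by simp [hy])
    simp [List.foldl_cons, pvStepB, hx, ih hxs]

theorem pvFoldB_enter (r r0 : Int) (hne : r ≠ r0) (L : List String) (hL : ∀ x ∈ L, pvRank x = r)
    (hne' : L ≠ []) (names lines : List String) :
    L.foldl pvStepB (r0, names, lines) =
      (r, L.map pvMapIcon, if names ≠ [] then lines ++ [pvLine r0 names] else lines) := by
  cases L with
  | nil => exact absurd rfl hne'
  | cons x xs =>
    have hx : pvRank x = r := hL x (by simp)
    have hxs : ∀ y ∈ xs, pvRank y = r := fun y hy => hL y (by simp [hy])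
    simp [List.foldl_cons, pvStepB, hx, hne, pvFoldB_same r xs hxs]

theorem pvKey_injective : Function.Injective pvKey := by
  intro a b h
  have := congrArg (fun x => (ofLex x).2) h
  simpa [pvKey] using this

theorem pvKey_le {a b : String} (hr : pvRank a = pvRank b) (hab : a ≤ b) : pvKey a ≤ pvKey b := by
  rw [pvKey, pvKey, Prod.Lex.le_iff]
  right
  exact ⟨hr, hab⟩

theorem pvKey_lt_le {a b : String} (hr : pvRank a < pvRank b) : pvKey a ≤ pvKey b := by
  rw [pvKey, pvKey, Prod.Lex.le_iff]
  left
  exact hr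

theorem pvGroup_rank {icons : List String} {r : Int} {x : String} (hx : x ∈ pvGroup icons r) :
    pvRank x = r := by
  have := (List.mem_filter.mp hx).2
  simpa using this

theorem pvRank_cases (x : String) : pvRank x = 0 ∨ pvRank x = 1 ∨ pvRank x = 2 := by
  unfold pvRank
  by_cases hb : pvIsBrand x <;> by_cases hr : pvIsRegular x <;> simp [hb, hr]

theorem pvBool1 (x : String) :
    ((pvRank x == 1) && !(pvRank x == 0)) = (pvRank x == 1) := by
  rcases pvRank_cases x with h | h | h <;> simp [h]

theorem pvBool2 (x : String) :
    (!(pvRank x == 1) && !(pvRank x == 0)) = (pvRank x == 2) := by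
  rcases pvRank_cases x with h | h | h <;> simp [h]

theorem pvPerm (icons : List String) :
    icons.Perm (pvGroup icons 0 ++ pvGroup icons 1 ++ pvGroup icons 2) := by
  have hS : (PySem.List.sorted icons (fun x => x) false).Perm icons :=
    PySem.List.sorted_perm icons (fun x => x) false
  refine hS.symm.trans ?_
  unfold pvGroup
  have p1 := (List.filter_append_perm (fun i => pvRank i == 0)
    (PySem.List.sorted icons (fun x => x) false)).symm
  refine p1.trans ?_
  rw [List.append_assoc]
  refine List.Perm.append_left _ ?_
  have p2 := (List.filter_append_perm (fun i => pvRank i == 1)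
    ((PySem.List.sorted icons (fun x => x) false).filter (fun i => !(pvRank i == 0)))).symm
  refine p2.trans ?_
  rw [List.filter_filter, List.filter_filter]
  refine List.Perm.append ?_ ?_
  · rw [List.filter_congr (fun x _ => pvBool1 x)]
  · rw [List.filter_congr (fun x _ => pvBool2 x)]

theorem pvPairwise (icons : List String) :
    (pvGroup icons 0 ++ pvGroup icons 1 ++ pvGroup icons 2).Pairwise
      (fun a b => pvKey a ≤ pvKey b) := by
  have hSp : (PySem.List.sorted icons (fun x => x) false).Pairwise (fun a b => a ≤ b) :=
    PySem.List.sorted_pairwise icons (fun x => x)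
  have hgrp : ∀ r : Int, (pvGroup icons r).Pairwise (fun a b => pvKey a ≤ pvKey b) := by
    intro r
    have h1 : (pvGroup icons r).Pairwise (fun a b : String => a ≤ b) := hSp.filter _
    refine List.Pairwise.imp_of_mem ?_ h1
    intro a b ha hb hab
    exact pvKey_le ((pvGroup_rank ha).trans (pvGroup_rank hb).symm) hab
  have hcross : ∀ (r s : Int), r < s → ∀ a ∈ pvGroup icons r, ∀ b ∈ pvGroup icons s,
      pvKey a ≤ pvKey b := by
    intro r s hrs a ha b hb
    refine pvKey_lt_le ?_
    rw [pvGroup_rank ha, pvGroup_rank hb]; exact hrs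
  rw [List.pairwise_append, List.pairwise_append]
  refine ⟨⟨hgrp 0, hgrp 1, hcross 0 1 (by norm_num)⟩, hgrp 2, ?_⟩
  intro a ha b hb
  rcases List.mem_append.mp ha with h | h
  · exact hcross 0 2 (by norm_num) a h b hb
  · exact hcross 1 2 (by norm_num) a h b hb

-- the composite-key sort is exactly the three rank groups of sorted(icons), in rank order
theorem pvSorted_key_eq (icons : List String) :
    PySem.List.sorted icons pvKey = pvGroup icons 0 ++ pvGroup icons 1 ++ pvGroup icons 2 := by
  have h1 : PySem.List.sorted icons pvKey =
      PySem.List.sorted (pvGroup icons 0 ++ pvGroup icons 1 ++ pvGroup icons 2) pvKey :=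
    PySem.List.sorted_eq_sorted_of_perm _ _ _ pvKey_injective (pvPerm icons)
  rw [h1, PySem.List.sorted_eq_self_of_pairwise _ _ (pvPairwise icons)]

theorem pvA_eq (icons : List String) (h : icons ≠ []) :
    generate_import_statements icons = PySem.Str.join "\n" (pvExpected icons) := by
  unfold generate_import_statements
  rw [if_neg h, pvFoldA]
  simp only [pvExpected, pvLine0_eq, pvLine1_eq, pvLine2_eq, pvGroup, List.nil_append]

theorem pvB_eq (icons : List String) :
    generate_import_statements_alt icons = PySem.Str.join "\n" (pvExpected icons) := by
  have hk : (fun icon => toLex (pvRank icon, icon)) = pvKey := rfl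
  simp only [generate_import_statements_alt]
  rw [hk, pvSorted_key_eq, List.foldl_append, List.foldl_append]
  have r0 : ∀ x ∈ pvGroup icons 0, pvRank x = 0 := fun x hx => pvGroup_rank hx
  have r1 : ∀ x ∈ pvGroup icons 1, pvRank x = 1 := fun x hx => pvGroup_rank hx
  have r2 : ∀ x ∈ pvGroup icons 2, pvRank x = 2 := fun x hx => pvGroup_rank hx
  by_cases g0 : pvGroup icons 0 = [] <;> by_cases g1 : pvGroup icons 1 = [] <;>
    by_cases g2 : pvGroup icons 2 = []
  · simp [pvExpected, g0, g1, g2]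
  · rw [g0, g1]
    simp only [List.foldl_nil]
    rw [pvFoldB_enter 2 (-1) (by norm_num) _ r2 g2 [] []]
    simp [pvExpected, g0, g1, g2]
  · rw [g0]
    simp only [List.foldl_nil]
    rw [pvFoldB_enter 1 (-1) (by norm_num) _ r1 g1 [] [], g2]
    simp [pvExpected, g0, g1, g2]
  · rw [g0]
    simp only [List.foldl_nil]
    rw [pvFoldB_enter 1 (-1) (by norm_num) _ r1 g1 [] []]
    simp only [ne_eq, not_true_eq_false, if_false, List.nil_append]
    rw [pvFoldB_enter 2 1 (by norm_num) _ r2 g2 _ _]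
    simp [pvExpected, g0, g1, g2]
  · rw [pvFoldB_enter 0 (-1) (by norm_num) _ r0 g0 [] [], g1, g2]
    simp [pvExpected, g0, g1, g2]
  · rw [pvFoldB_enter 0 (-1) (by norm_num) _ r0 g0 [] [], g1]
    simp only [List.foldl_nil]
    rw [pvFoldB_enter 2 0 (by norm_num) _ r2 g2 _ _]
    simp [pvExpected, g0, g1, g2]
  · rw [pvFoldB_enter 0 (-1) (by norm_num) _ r0 g0 [] []]
    rw [pvFoldB_enter 1 0 (by norm_num) _ r1 g1 _ _, g2]
    simp [pvExpected, g0, g1, g2]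
  · rw [pvFoldB_enter 0 (-1) (by norm_num) _ r0 g0 [] []]
    rw [pvFoldB_enter 1 0 (by norm_num) _ r1 g1 _ _]
    rw [pvFoldB_enter 2 1 (by norm_num) _ r2 g2 _ _]
    simp [pvExpected, g0, g1, g2]

-- ===== VERDICT (by name: the statement is the Claim_ definition above) =====
theorem generate_import_statements_spec : Claim_equal_generate_import_statements := by
  intro icons _
  unfold Spec_generate_import_statements
  by_cases h : icons = []
  · subst h; decide
  · rw [pvA_eq icons h, pvB_eq icons]
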